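-- pv_equiv track=rewrite | github.com/prangel-git/number_theory | numbertheory/src/chapter2.py | exercise2_14
-- ===== SOURCE A (Python) =====
-- from math import isqrt
--
-- def is_square(number):
--     sqrt_number = isqrt(number)
--     is_square_number = sqrt_number * sqrt_number == number
--     return is_square_number
--
-- def is_euler_brick(a, b, c):
--     if not is_square(a * a + b * b):
--         return False
--     if not is_square(a * a + c * c):
--         return False
--     if not is_square(b * b + c * c):
--         return False
--
--     return True
--
-- def exercise2_14(bound=3471):
--     a0, b0, c0 = (0, 0, 0)
--     diagonal0 = 0
--     for a in range(1, bound):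
--         for b in range(a + 1, bound):
--             if is_square(a * a + b * b):
--                 for c in range(b + 1, bound):
--                     diagonal = isqrt(b * b + c * c)
--                     if diagonal > bound:
--                         break
--                     if is_euler_brick(a, b, c) and diagonal > diagonal0:
--                         a0, b0, c0 = (a, b, c)
--
--     return a0, b0, c0
-- ===== SOURCE B (Python) =====
-- from math import isqrt
--
--
-- def exercise2_14(bound=3471):
--     # Precompute the sparse list of pairs (a, b), a < b < bound, with a*a + b*b a
--     # perfect square, in lexicographic order, plus a set for O(1) membership.
--     pairs = []
--     for a in range(1, bound):
--         aa = a * a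
--         for b in range(a + 1, bound):
--             s = aa + b * b
--             r = isqrt(s)
--             if r * r == s:
--                 pairs.append((a, b))
--     pair_set = set(pairs)
--
--     best = (0, 0, 0)
--     for (a, b) in pairs:
--         # c must satisfy isqrt(b*b + c*c) <= bound, i.e. c <= cmax, and c < bound.
--         cmax = isqrt(bound * bound + 2 * bound - b * b)
--         for c in range(b + 1, min(bound, cmax + 1)):
--             if (a, c) in pair_set and (b, c) in pair_set:
--                 best = (a, b, c)
--     return best
-- ===== Notes on version B (the rewrite author's own statement) =====
-- stated objective: faster
-- what changed: B precomputes once the sparse list of pairs (a,b) with a^2+b^2 a perfect square plus a hash set over it, then extends each pair by c using a closed-form cutoff c <= isqrt((bound+1)^2-1-b^2) and two O(1) set lookups, instead of A's per-c isqrt of the diagonal and is_euler_brick re-testing of three square-sums inside the triple loop.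
import Mathlib
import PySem

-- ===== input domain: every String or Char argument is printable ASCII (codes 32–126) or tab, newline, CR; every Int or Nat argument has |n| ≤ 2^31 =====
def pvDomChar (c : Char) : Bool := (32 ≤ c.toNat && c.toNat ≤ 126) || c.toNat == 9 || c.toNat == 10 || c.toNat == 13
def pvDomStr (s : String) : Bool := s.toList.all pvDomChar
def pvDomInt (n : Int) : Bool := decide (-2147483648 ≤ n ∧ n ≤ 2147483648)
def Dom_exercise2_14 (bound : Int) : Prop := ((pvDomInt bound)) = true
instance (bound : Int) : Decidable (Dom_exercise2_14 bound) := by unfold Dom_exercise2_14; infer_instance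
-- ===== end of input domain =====

-- B precomputes the sparse list/set of pairs whose square-sum is a square plus a closed-form
-- cutoff for c, replacing A's per-c isqrt and is_euler_brick recomputation (objective: faster).

-- ===== PORT A =====
-- math.isqrt, exact on nonnegative arguments (the only ones these programs pass it)
def pyIsqrt (n : Int) : Int := (Nat.sqrt n.toNat : Int)

def isSquare (number : Int) : Bool :=
  let sqrtNumber := pyIsqrt number
  sqrtNumber * sqrtNumber == number

def isEulerBrick (a b c : Int) : Bool :=
  if !isSquare (a * a + b * b) then false
  else if !isSquare (a * a + c * c) then false
  else if !isSquare (b * b + c * c) then false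
  else true

-- A's inner 'for c' loop with its break (diagonal0 is assigned once before the loops
-- and never reassigned, so it is a constant parameter here)
def loopC (bound a b diagonal0 : Int) : List Int → Int × Int × Int → Int × Int × Int
  | [], st => st
  | c :: cs, st =>
    let diagonal := pyIsqrt (b * b + c * c)
    if diagonal > bound then st
    else loopC bound a b diagonal0 cs
      (if isEulerBrick a b c && diagonal > diagonal0 then (a, b, c) else st)

def exercise2_14 (bound : Int) : List Int :=
  let diagonal0 : Int := 0
  let st :=
    (PySem.List.pyRange 1 bound 1).foldl (fun st a =>
      (PySem.List.pyRange (a + 1) bound 1).foldl (fun st b =>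
        if isSquare (a * a + b * b) then
          loopC bound a b diagonal0 (PySem.List.pyRange (b + 1) bound 1) st
        else st) st) ((0, 0, 0) : Int × Int × Int)
  [st.1, st.2.1, st.2.2]

-- ===== PORT B =====
def altPairs (bound : Int) : List (Int × Int) :=
  (PySem.List.pyRange 1 bound 1).foldl (fun pairs a =>
    (PySem.List.pyRange (a + 1) bound 1).foldl (fun pairs b =>
      let s := a * a + b * b
      let r := pyIsqrt s
      if r * r == s then pairs ++ [(a, b)] else pairs) pairs) []

def exercise2_14_alt (bound : Int) : List Int :=
  let pairs := altPairs bound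
  let pairSet : PySem.Set (Int × Int) := PySem.Set.ofList pairs
  let best :=
    pairs.foldl (fun best p =>
      -- the isqrt argument is positive whenever this body runs (1 ≤ p.2 < bound)
      (PySem.List.pyRange (p.2 + 1)
          (min bound (pyIsqrt (bound * bound + 2 * bound - p.2 * p.2) + 1)) 1).foldl
        (fun best c =>
          if PySem.Set.contains pairSet (p.1, c) && PySem.Set.contains pairSet (p.2, c) then
            (p.1, p.2, c)
          else best) best) ((0, 0, 0) : Int × Int × Int)
  [best.1, best.2.1, best.2.2]

-- ===== PRECONDITION & SPEC =====
def Spec_exercise2_14 (bound : Int) (out : List Int) : Prop := out = exercise2_14_alt bound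
instance (bound : Int) (out : List Int) : Decidable (Spec_exercise2_14 bound out) := by unfold Spec_exercise2_14; infer_instance

-- ===== CLAIM (what is proved, stated in full; the proofs are below) =====
def Claim_equal_exercise2_14 : Prop := ∀ (bound : Int), Dom_exercise2_14 bound → Spec_exercise2_14 bound (exercise2_14 bound)

-- ===== LEMMAS AND PROOFS =====

theorem pyIsqrt_mono {x y : Int} (h : x ≤ y) : pyIsqrt x ≤ pyIsqrt y := by
  simp only [pyIsqrt, Nat.cast_le]
  exact Nat.sqrt_le_sqrt (Int.toNat_le_toNat h)

-- the pair list B builds, as a flatMap of filtered ranges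
theorem altPairs_eq (bound : Int) :
    altPairs bound = (PySem.List.pyRange 1 bound 1).flatMap (fun a =>
      ((PySem.List.pyRange (a + 1) bound 1).filter
        (fun b => isSquare (a * a + b * b))).map (fun b => (a, b))) := by
  unfold altPairs
  have h1 : (PySem.List.pyRange 1 bound 1).foldl (fun pairs a =>
      (PySem.List.pyRange (a + 1) bound 1).foldl (fun pairs b =>
        let s := a * a + b * b
        let r := pyIsqrt s
        if r * r == s then pairs ++ [(a, b)] else pairs) pairs) [] =
      (PySem.List.pyRange 1 bound 1).foldl (fun pairs a =>
        pairs ++ ((PySem.List.pyRange (a + 1) bound 1).filter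
          (fun b => isSquare (a * a + b * b))).map (fun b => (a, b))) [] := by
    apply PySem.List.foldl_congr_mem
    intro acc a _
    simp only [PySem.List.foldl_append_if, isSquare]
  rw [h1, PySem.List.foldl_append_eq_flatMap]
  rfl

theorem mem_altPairs (bound : Int) (p : Int × Int) :
    p ∈ altPairs bound ↔
      1 ≤ p.1 ∧ p.1 < p.2 ∧ p.2 < bound ∧ isSquare (p.1 * p.1 + p.2 * p.2) = true := by
  obtain ⟨x, y⟩ := p
  rw [altPairs_eq]
  simp only [List.mem_flatMap, List.mem_map, List.mem_filter, PySem.List.mem_pyRange_one,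
    Prod.mk.injEq]
  constructor
  · rintro ⟨a, ⟨ha1, _⟩, b, ⟨⟨hb1, hb2⟩, hsq⟩, h1, h2⟩
    subst h1; subst h2
    exact ⟨ha1, by omega, hb2, hsq⟩
  · rintro ⟨h1, h2, h3, h4⟩
    exact ⟨x, ⟨h1, by omega⟩, y, ⟨⟨by omega, h3⟩, h4⟩, rfl, rfl⟩

-- bracket: the diagonal fits the bound iff c is at most B's closed-form cutoff
theorem diag_le_iff (bound b c : Int) (hb : 1 ≤ b) (hbc : b < c) (hbb : b < bound) :
    pyIsqrt (b * b + c * c) ≤ bound ↔ c ≤ pyIsqrt (bound * bound + 2 * bound - b * b) := by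
  have hb0 : 0 ≤ b := by omega
  have hc0 : 0 ≤ c := by omega
  set b' := b.toNat with hb'
  set c' := c.toNat with hc'
  set B := bound.toNat with hB'
  have eb : b = (b' : Int) := by omega
  have ec : c = (c' : Int) := by omega
  have eB : bound = (B : Int) := by omega
  have hbB : b' < B := by omega
  have hmsub : b' * b' ≤ B * B + 2 * B := by nlinarith [hbB]
  have hm : (bound * bound + 2 * bound - b * b).toNat = B * B + 2 * B - b' * b' := by
    rw [eb, eB]; omega
  have hn : (b * b + c * c).toNat = b' * b' + c' * c' := by
    rw [eb, ec]; omega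
  unfold pyIsqrt
  rw [hm, hn, eB, ec]
  have goalNat : Nat.sqrt (b' * b' + c' * c') ≤ B ↔ c' ≤ Nat.sqrt (B * B + 2 * B - b' * b') := by
    have h1 : Nat.sqrt (b' * b' + c' * c') ≤ B ↔ b' * b' + c' * c' ≤ B * B + 2 * B := by
      rw [← Nat.not_lt, ← Nat.not_lt]
      have := Nat.le_sqrt (m := B + 1) (n := b' * b' + c' * c')
      constructor
      · intro h hlt; exact h (this.2 (by nlinarith [hlt]))
      · intro h hlt; have := this.1 hlt; nlinarith [this]
    have h2 : c' ≤ Nat.sqrt (B * B + 2 * B - b' * b') ↔ b' * b' + c' * c' ≤ B * B + 2 * B := by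
      rw [Nat.le_sqrt]; omega
    rw [h1, h2]
  constructor
  · intro h; exact_mod_cast goalNat.1 (by exact_mod_cast h)
  · intro h; exact_mod_cast goalNat.2 (by exact_mod_cast h)

theorem diag_pos (b c : Int) (hb : 1 ≤ b) : 0 < pyIsqrt (b * b + c * c) := by
  unfold pyIsqrt
  have h0 : (1 : Int) ≤ b * b + c * c := by nlinarith [mul_self_nonneg c]
  have h1 : 1 ≤ (b * b + c * c).toNat := by omega
  have h2 := (Nat.le_sqrt (m := 1) (n := (b * b + c * c).toNat)).2 (by omega)
  exact_mod_cast h2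

theorem filter_le_pyRange (a b m : Int) :
    (PySem.List.pyRange a b 1).filter (fun c => decide (c ≤ m)) =
      PySem.List.pyRange a (min b (m + 1)) 1 := by
  by_cases hab : b ≤ a
  · rw [PySem.List.pyRange_one_eq_nil hab, PySem.List.pyRange_one_eq_nil (by omega)]
    rfl
  · by_cases ham : a ≤ m
    · have h1 : a ≤ min b (m + 1) := by omega
      have h2 : min b (m + 1) ≤ b := by omega
      rw [PySem.List.pyRange_one_append a (min b (m + 1)) b h1 h2, List.filter_append]
      have hfst : (PySem.List.pyRange a (min b (m + 1)) 1).filter (fun c => decide (c ≤ m)) =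
          PySem.List.pyRange a (min b (m + 1)) 1 := by
        apply List.filter_eq_self.2
        intro c hc
        have := (PySem.List.mem_pyRange_one).1 hc
        simp; omega
      have hsnd : (PySem.List.pyRange (min b (m + 1)) b 1).filter (fun c => decide (c ≤ m)) = [] := by
        apply List.filter_eq_nil_iff.2
        intro c hc
        have := (PySem.List.mem_pyRange_one).1 hc
        simp; omega
      rw [hfst, hsnd, List.append_nil]
    · rw [PySem.List.pyRange_one_eq_nil (show min b (m + 1) ≤ a by omega)]
      apply List.filter_eq_nil_iff.2
      intro c hc
      have := (PySem.List.mem_pyRange_one).1 hc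
      simp; omega

-- break elimination: A's c-loop is a fold over the prefix on which the diagonal fits
theorem loopC_eq (bound a b : Int) (cs : List Int) (h0 : ∀ c ∈ cs, 0 ≤ c)
    (hs : cs.Pairwise (· ≤ ·)) (st : Int × Int × Int) :
    loopC bound a b 0 cs st =
      (cs.filter (fun c => decide (pyIsqrt (b * b + c * c) ≤ bound))).foldl
        (fun st c => if isEulerBrick a b c && pyIsqrt (b * b + c * c) > 0 then (a, b, c) else st)
        st := by
  induction cs generalizing st with
  | nil => rfl
  | cons c cs ih =>
    simp only [loopC, List.filter_cons]
    by_cases hgt : pyIsqrt (b * b + c * c) > bound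
    · rw [if_pos hgt]
      have hfe : cs.filter (fun c => decide (pyIsqrt (b * b + c * c) ≤ bound)) = [] := by
        apply List.filter_eq_nil_iff.2
        intro c' hc'
        have hle : c ≤ c' := (List.pairwise_cons.1 hs).1 c' hc'
        have hcc : b * b + c * c ≤ b * b + c' * c' := by
          have h0c : 0 ≤ c := h0 c (by simp)
          nlinarith
        have := pyIsqrt_mono hcc
        simp; omega
      rw [if_neg (by simp; omega), hfe]
      rfl
    · rw [if_neg hgt]
      rw [if_pos (show (decide (pyIsqrt (b * b + c * c) ≤ bound)) = true by
        simp only [decide_eq_true_eq]; omega)]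
      simp only [List.foldl_cons]
      exact ih (fun c' hc' => h0 c' (by simp [hc'])) (List.pairwise_cons.1 hs).2 _

-- inner loops agree, given the facts the outer loops provide about a and b
theorem inner_eq (bound a b : Int) (S : PySem.Set (Int × Int))
    (hS : ∀ p, p ∈ S ↔ p ∈ altPairs bound)
    (ha : 1 ≤ a) (hab : a < b) (hbb : b < bound)
    (hsq : isSquare (a * a + b * b) = true) (st : Int × Int × Int) :
    loopC bound a b 0 (PySem.List.pyRange (b + 1) bound 1) st =
      (PySem.List.pyRange (b + 1)
          (min bound (pyIsqrt (bound * bound + 2 * bound - b * b) + 1)) 1).foldl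
        (fun st c =>
          if PySem.Set.contains S (a, c) && PySem.Set.contains S (b, c) then (a, b, c) else st)
        st := by
  rw [loopC_eq bound a b _ (fun c hc => by
        have := (PySem.List.mem_pyRange_one).1 hc; omega)
      ((PySem.List.pairwise_lt_pyRange_one (b + 1) bound).imp (fun h => le_of_lt h)) st]
  have hfilter : (PySem.List.pyRange (b + 1) bound 1).filter
      (fun c => decide (pyIsqrt (b * b + c * c) ≤ bound)) =
      PySem.List.pyRange (b + 1)
        (min bound (pyIsqrt (bound * bound + 2 * bound - b * b) + 1)) 1 := by
    rw [← filter_le_pyRange]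
    apply List.filter_congr
    intro c hc
    have hmem := (PySem.List.mem_pyRange_one).1 hc
    simp only [decide_eq_decide]
    exact diag_le_iff bound b c (by omega) (by omega) hbb
  rw [hfilter]
  apply PySem.List.foldl_congr_mem
  intro st c hc
  have hmem := (PySem.List.mem_pyRange_one).1 hc
  have hcb : c < bound := by omega
  have hbc : b < c := by omega
  have hEB : isEulerBrick a b c = (isSquare (a * a + c * c) && isSquare (b * b + c * c)) := by
    simp only [isEulerBrick, hsq]
    cases isSquare (a * a + c * c) <;> cases isSquare (b * b + c * c) <;> rfl
  have hca : PySem.Set.contains S (a, c) = isSquare (a * a + c * c) := by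
    apply Bool.coe_iff_coe.mp
    rw [PySem.Set.contains_iff, hS, mem_altPairs]
    constructor
    · rintro ⟨_, _, _, h⟩; exact h
    · intro h; exact ⟨ha, by omega, hcb, h⟩
  have hcbS : PySem.Set.contains S (b, c) = isSquare (b * b + c * c) := by
    apply Bool.coe_iff_coe.mp
    rw [PySem.Set.contains_iff, hS, mem_altPairs]
    constructor
    · rintro ⟨_, _, _, h⟩; exact h
    · intro h; exact ⟨by omega, hbc, hcb, h⟩
  have hdp : decide (pyIsqrt (b * b + c * c) > 0) = true :=
    decide_eq_true (diag_pos b c (by omega))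
  rw [hEB, hca, hcbS, hdp, Bool.and_true]

-- the two outer folds agree
theorem fold_eq (bound : Int) (S : PySem.Set (Int × Int))
    (hS : ∀ p, p ∈ S ↔ p ∈ altPairs bound) :
    (PySem.List.pyRange 1 bound 1).foldl (fun st a =>
      (PySem.List.pyRange (a + 1) bound 1).foldl (fun st b =>
        if isSquare (a * a + b * b) then
          loopC bound a b 0 (PySem.List.pyRange (b + 1) bound 1) st
        else st) st) ((0, 0, 0) : Int × Int × Int) =
    (altPairs bound).foldl (fun best p =>
      (PySem.List.pyRange (p.2 + 1)
          (min bound (pyIsqrt (bound * bound + 2 * bound - p.2 * p.2) + 1)) 1).foldl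
        (fun best c =>
          if PySem.Set.contains S (p.1, c) && PySem.Set.contains S (p.2, c) then
            (p.1, p.2, c)
          else best) best) ((0, 0, 0) : Int × Int × Int) := by
  conv_rhs => rw [altPairs_eq bound, List.foldl_flatMap]
  apply PySem.List.foldl_congr_mem
  intro st a hamem
  have ha := (PySem.List.mem_pyRange_one).1 hamem
  rw [List.foldl_map, ← PySem.List.foldl_if_eq_foldl_filter]
  apply PySem.List.foldl_congr_mem
  intro st b hbmem
  have hb := (PySem.List.mem_pyRange_one).1 hbmem
  by_cases hsq : isSquare (a * a + b * b) = true
  · rw [if_pos hsq, if_pos hsq]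
    exact inner_eq bound a b S hS (by omega) (by omega) (by omega) hsq st
  · rw [if_neg hsq, if_neg hsq]

-- ===== VERDICT (by name: the statement is the Claim_ definition above) =====
theorem exercise2_14_spec : Claim_equal_exercise2_14 := by
  intro bound _
  unfold Spec_exercise2_14
  simp only [exercise2_14, exercise2_14_alt]
  rw [fold_eq bound (PySem.Set.ofList (altPairs bound))
    (fun p => PySem.Set.mem_ofList (altPairs bound) p)]
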